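-- pv_equiv track=rewrite | github.com/Jesusr1297/binarySearch | easy/appendListToSumTarget.py | solve
-- ===== SOURCE A (Python) =====
-- def solve(nums, k, target):
--     num_sum = sum(nums)
--     moves = 0
--     if target > num_sum:
--         while num_sum < target:
--             num_sum += k
--             moves += 1
--         return moves
--     elif target < num_sum:
--         while target < num_sum:
--             num_sum -= k
--             moves += 1
--         return moves
--     else:
--         return 0
-- ===== SOURCE B (Python) =====
-- def solve(nums, k, target):
--     d = abs(target - sum(nums))
--     return 0 if d == 0 else -(-d // k)
-- ===== Notes on version B (the rewrite author's own statement) =====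
-- stated objective: simpler
-- what changed: Replaced the step-by-step adjustment loops with a single closed-form ceiling division ceil(|target-sum|/k).
import Mathlib
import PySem

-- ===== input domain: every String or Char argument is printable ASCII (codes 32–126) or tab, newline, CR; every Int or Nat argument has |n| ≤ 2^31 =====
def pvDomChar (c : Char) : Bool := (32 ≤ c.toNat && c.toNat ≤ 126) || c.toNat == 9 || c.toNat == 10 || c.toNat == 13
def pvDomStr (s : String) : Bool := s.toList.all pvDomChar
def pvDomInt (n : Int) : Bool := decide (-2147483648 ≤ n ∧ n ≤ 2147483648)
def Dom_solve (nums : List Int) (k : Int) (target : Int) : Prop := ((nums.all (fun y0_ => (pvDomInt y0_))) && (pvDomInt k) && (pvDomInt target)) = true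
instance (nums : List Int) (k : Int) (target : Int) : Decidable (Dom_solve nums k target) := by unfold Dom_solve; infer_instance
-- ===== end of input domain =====

-- B replaces A's one-step-at-a-time while loops by a single closed-form ceiling division (simpler).

-- ===== PORT A =====
-- A's first while loop: num_sum += k; moves += 1 while num_sum < target.
-- The 'if 0 < k' guard only ensures totality: for k ≤ 0 and num_sum < target the Python loop never terminates (excluded by Pre_).
def solveLoopUp (k target num_sum moves : Int) : Int :=
  if _h : num_sum < target then
    if _hk : 0 < k then solveLoopUp k target (num_sum + k) (moves + 1)
    else moves
  else moves
termination_by (target - num_sum).toNat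
decreasing_by omega

-- A's second while loop: num_sum -= k; moves += 1 while target < num_sum.
def solveLoopDown (k target num_sum moves : Int) : Int :=
  if _h : target < num_sum then
    if _hk : 0 < k then solveLoopDown k target (num_sum - k) (moves + 1)
    else moves
  else moves
termination_by (num_sum - target).toNat
decreasing_by omega

def solve (nums : List Int) (k : Int) (target : Int) : Int :=
  let num_sum := nums.sum
  if target > num_sum then solveLoopUp k target num_sum 0
  else if target < num_sum then solveLoopDown k target num_sum 0
  else 0

-- ===== PORT B =====
def solve_alt (nums : List Int) (k : Int) (target : Int) : Int :=
  let d := |target - nums.sum|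
  if d = 0 then 0 else -(PySem.Int.floordiv (-d) k)

-- ===== PRECONDITION & SPEC =====
-- Pre_ excludes exactly the inputs where A never returns: with k ≤ 0 and target ≠ sum(nums), A's while loop diverges.
def Pre_solve (nums : List Int) (k : Int) (target : Int) : Prop :=
  target = nums.sum ∨ 0 < k
instance (nums : List Int) (k : Int) (target : Int) : Decidable (Pre_solve nums k target) := by unfold Pre_solve; infer_instance
def pvWitness_solve : List Int × Int × Int := ([1, 2], 3, 10)

def Spec_solve (nums : List Int) (k : Int) (target : Int) (out : Int) : Prop := out = solve_alt nums k target
instance (nums : List Int) (k : Int) (target : Int) (out : Int) : Decidable (Spec_solve nums k target out) := by unfold Spec_solve; infer_instance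

-- ===== CLAIM (what is proved, stated in full; the proofs are below) =====
def Claim_equal_solve : Prop := ∀ (nums : List Int) (k : Int) (target : Int), Dom_solve nums k target → Pre_solve nums k target → Spec_solve nums k target (solve nums k target)

-- ===== LEMMAS AND PROOFS =====

theorem solveLoopUp_eq (k target num_sum moves : Int) (hk : 0 < k) (h : num_sum < target) :
    solveLoopUp k target num_sum moves = moves + -(PySem.Int.floordiv (-(target - num_sum)) k) := by
  fun_induction solveLoopUp k target num_sum moves with
  | case1 s m h1 hk' ih =>
    by_cases h2 : s + k < target
    · rw [ih h2]
      set q := -(PySem.Int.floordiv (-(target - (s + k))) k) with hq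
      have hb := (PySem.Int.neg_floordiv_neg_eq_iff_of_pos (a := target - (s + k)) (b := k) (q := q) hk).mp hq.symm
      have hc : -(PySem.Int.floordiv (-(target - s)) k) = q + 1 := by
        rw [PySem.Int.neg_floordiv_neg_eq_iff_of_pos hk]
        have e1 : (q + 1 - 1) * k = (q - 1) * k + k := by ring
        have e2 : (q + 1) * k = q * k + k := by ring
        constructor
        · rw [e1]; omega
        · rw [e2]; omega
      rw [hc]; ring
    · -- last iteration: inner call returns its accumulator
      have hz : solveLoopUp k target (s + k) (m + 1) = m + 1 := by
        rw [solveLoopUp]; simp [show ¬ (s + k < target) from h2]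
      rw [hz]
      have hc : -(PySem.Int.floordiv (-(target - s)) k) = 1 := by
        rw [PySem.Int.neg_floordiv_neg_eq_iff_of_pos hk]
        constructor <;> simp <;> omega
      rw [hc]
  | case2 s m h1 hk' => omega
  | case3 s m h1 => omega

theorem solveLoopDown_eq (k target num_sum moves : Int) (hk : 0 < k) (h : target < num_sum) :
    solveLoopDown k target num_sum moves = moves + -(PySem.Int.floordiv (-(num_sum - target)) k) := by
  fun_induction solveLoopDown k target num_sum moves with
  | case1 s m h1 hk' ih =>
    by_cases h2 : target < s - k
    · rw [ih h2]
      set q := -(PySem.Int.floordiv (-(s - k - target)) k) with hq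
      have hb := (PySem.Int.neg_floordiv_neg_eq_iff_of_pos (a := s - k - target) (b := k) (q := q) hk).mp hq.symm
      have hc : -(PySem.Int.floordiv (-(s - target)) k) = q + 1 := by
        rw [PySem.Int.neg_floordiv_neg_eq_iff_of_pos hk]
        have e1 : (q + 1 - 1) * k = (q - 1) * k + k := by ring
        have e2 : (q + 1) * k = q * k + k := by ring
        constructor
        · rw [e1]; omega
        · rw [e2]; omega
      rw [hc]; ring
    · have hz : solveLoopDown k target (s - k) (m + 1) = m + 1 := by
        rw [solveLoopDown]; simp [show ¬ (target < s - k) from h2]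
      rw [hz]
      have hc : -(PySem.Int.floordiv (-(s - target)) k) = 1 := by
        rw [PySem.Int.neg_floordiv_neg_eq_iff_of_pos hk]
        constructor <;> simp <;> omega
      rw [hc]
  | case2 s m h1 hk' => omega
  | case3 s m h1 => omega

-- ===== VERDICT (by name: the statement is the Claim_ definition above) =====
theorem solve_spec : Claim_equal_solve := by
  intro nums k target _hdom hpre
  unfold Spec_solve solve solve_alt
  set s := nums.sum with hs
  show (if target > s then solveLoopUp k target s 0
        else if target < s then solveLoopDown k target s 0 else 0) =
       (if |target - s| = 0 then 0 else -(PySem.Int.floordiv (-(|target - s|)) k))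
  by_cases h1 : target > s
  · have hk : 0 < k := by rcases hpre with h | h; omega; exact h
    have habs : |target - s| = target - s := abs_of_pos (by omega)
    rw [if_pos h1, habs, if_neg (by omega : ¬ (target - s = 0))]
    have := solveLoopUp_eq k target s 0 hk h1; omega
  · by_cases h2 : target < s
    · have hk : 0 < k := by rcases hpre with h | h; omega; exact h
      have habs : |target - s| = s - target := by rw [abs_of_neg (by omega)]; ring
      rw [if_neg h1, if_pos h2, habs, if_neg (by omega : ¬ (s - target = 0))]
      have := solveLoopDown_eq k target s 0 hk h2; omega
    · have h3 : target = s := by omega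
      rw [if_neg h1, if_neg h2, h3]
      simp
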